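-- pv_equiv track=rewrite | github.com/paulinastern/blender-agent | blend_agent_addon.py | _transcript_tail_lines
-- ===== SOURCE A (Python) =====
-- def _transcript_tail_lines(transcript, max_lines):
--     lines = [ln.rstrip() for ln in (transcript or "").splitlines()]
--     lines = [ln for ln in lines if ln.strip()]
--     try:
--         n = max(8, min(int(max_lines), 200))
--     except Exception:
--         n = 48
--     return lines[-n:]
-- ===== SOURCE B (Python) =====
-- def _transcript_tail_lines(transcript, max_lines):
--     try:
--         n = max(8, min(int(max_lines), 200))
--     except Exception:
--         n = 48
--     buf = []
--     for ln in reversed((transcript or "").splitlines()):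
--         r = ln.rstrip()
--         if r.strip():
--             buf.append(r)
--             if len(buf) == n:
--                 break
--     buf.reverse()
--     return buf
-- ===== Notes on version B (the rewrite author's own statement) =====
-- stated objective: alternative
-- what changed: Replaces A's two forward comprehensions plus a negative-index slice by a single backward scan over the lines that collects kept lines into a buffer and breaks as soon as it holds n, then reverses the buffer.
import Mathlib
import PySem

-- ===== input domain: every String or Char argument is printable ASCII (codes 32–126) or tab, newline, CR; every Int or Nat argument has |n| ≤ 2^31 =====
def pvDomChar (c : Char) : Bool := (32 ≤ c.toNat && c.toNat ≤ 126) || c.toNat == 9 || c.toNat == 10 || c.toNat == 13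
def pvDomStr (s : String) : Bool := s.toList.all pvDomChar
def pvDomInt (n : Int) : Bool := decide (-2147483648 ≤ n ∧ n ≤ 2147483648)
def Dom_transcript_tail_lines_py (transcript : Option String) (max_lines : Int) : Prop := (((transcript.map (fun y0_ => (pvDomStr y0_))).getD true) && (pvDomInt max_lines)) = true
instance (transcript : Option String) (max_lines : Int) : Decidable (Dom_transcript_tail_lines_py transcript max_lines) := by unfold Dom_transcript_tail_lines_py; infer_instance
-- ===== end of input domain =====

-- B replaces A's two forward comprehensions plus a negative slice by a single backward
-- early-terminating scan (objective: alternative decomposition; faster only when the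
-- transcript is much longer than the requested tail).

-- ===== PORT A =====
-- `transcript or ""`: None → ""; "" is falsy → "" as well, so Option.getD "" is exact.
-- `int(max_lines)` on an int is the identity and never raises, so the except-branch
-- (n = 48) is unreachable for an Int argument and the clamp is ported directly.
def transcript_tail_lines_py (transcript : Option String) (max_lines : Int) : List String :=
  let lines := (PySem.Str.splitlines (transcript.getD "")).map (fun ln => PySem.Str.rstrip ln)
  let lines := lines.filter (fun ln => PySem.Str.strip ln != "")
  let n : Int := max 8 (min max_lines 200)
  PySem.List.slice lines (some (-n)) none

-- ===== PORT B =====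
-- Source B's loop over reversed(lines) with `break` once the buffer holds n entries.
def pvTailGo (lines : List String) (n : Nat) (buf : List String) : List String :=
  match lines with
  | [] => buf
  | ln :: rest =>
    let r := PySem.Str.rstrip ln
    if PySem.Str.strip r != "" then
      let buf' := buf ++ [r]
      if buf'.length == n then buf' else pvTailGo rest n buf'
    else pvTailGo rest n buf

def transcript_tail_lines_py_alt (transcript : Option String) (max_lines : Int) : List String :=
  let n : Int := max 8 (min max_lines 200)
  (pvTailGo (PySem.Str.splitlines (transcript.getD "")).reverse n.toNat []).reverse

-- ===== PRECONDITION & SPEC =====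
def Spec_transcript_tail_lines_py (transcript : Option String) (max_lines : Int) (out : List String) : Prop := out = transcript_tail_lines_py_alt transcript max_lines
instance (transcript : Option String) (max_lines : Int) (out : List String) : Decidable (Spec_transcript_tail_lines_py transcript max_lines out) := by unfold Spec_transcript_tail_lines_py; infer_instance

-- ===== CLAIM (what is proved, stated in full; the proofs are below) =====
def Claim_equal_transcript_tail_lines_py : Prop := ∀ (transcript : Option String) (max_lines : Int), Dom_transcript_tail_lines_py transcript max_lines → Spec_transcript_tail_lines_py transcript max_lines (transcript_tail_lines_py transcript max_lines)

-- ===== LEMMAS AND PROOFS =====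

-- The filtered-and-rstripped line list both programs traverse.
def pvKept (sl : List String) : List String :=
  (sl.map (fun ln => PySem.Str.rstrip ln)).filter (fun ln => PySem.Str.strip ln != "")

lemma pvTailGo_spec (l : List String) (n : Nat) (buf : List String)
    (h : buf.length < n) : pvTailGo l n buf = buf ++ (pvKept l).take (n - buf.length) := by
  induction l generalizing buf with
  | nil => simp [pvTailGo, pvKept]
  | cons ln rest ih =>
    by_cases hp : (PySem.Str.strip (PySem.Str.rstrip ln) != "") = true
    · have hkept : pvKept (ln :: rest) = PySem.Str.rstrip ln :: pvKept rest := by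
        simp [pvKept, hp]
      rw [hkept]
      by_cases hfull : buf.length + 1 = n
      · have hgo : pvTailGo (ln :: rest) n buf = buf ++ [PySem.Str.rstrip ln] := by
          simp [pvTailGo, hp, hfull]
        rw [hgo]
        have h1 : n - buf.length = 1 := by omega
        simp [h1]
      · have hgo : pvTailGo (ln :: rest) n buf
            = pvTailGo rest n (buf ++ [PySem.Str.rstrip ln]) := by
          simp [pvTailGo, hp, hfull]
        rw [hgo, ih _ (by simp; omega)]
        have hk : n - buf.length = (n - (buf.length + 1)) + 1 := by omega
        simp [hk, List.take_succ_cons]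
    · have hp' : (PySem.Str.strip (PySem.Str.rstrip ln) != "") = false :=
        eq_false_of_ne_true hp
      have hkept : pvKept (ln :: rest) = pvKept rest := by
        simp [pvKept, hp']
      have hgo : pvTailGo (ln :: rest) n buf = pvTailGo rest n buf := by
        simp [pvTailGo, hp']
      rw [hgo, hkept, ih _ h]

lemma pvKept_reverse (sl : List String) : pvKept sl.reverse = (pvKept sl).reverse := by
  simp [pvKept]

-- last-n of a list via reverse/take/reverse
lemma pvTakeRev (l : List String) (n : Nat) :
    (l.reverse.take n).reverse = l.drop (l.length - n) := by
  by_cases h : n ≤ l.length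
  · rw [List.take_reverse]
    simp
  · rw [List.take_of_length_le (by simp; omega), List.reverse_reverse,
        Nat.sub_eq_zero_of_le (by omega), List.drop_zero]

lemma pvMain (sl : List String) (n : Int) (h8 : 8 ≤ n) :
    PySem.List.slice (pvKept sl) (some (-n)) none
      = (pvTailGo sl.reverse n.toNat []).reverse := by
  rw [pvTailGo_spec _ _ _ (by simp; omega), List.nil_append, pvKept_reverse, pvTakeRev]
  simp only [List.length_nil, Nat.sub_zero]
  have hneg : -n = -((n.toNat : Int)) := by omega
  rw [hneg, PySem.List.slice_from_neg_natCast _ _ (by omega)]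

-- ===== VERDICT (by name: the statement is the Claim_ definition above) =====
theorem transcript_tail_lines_py_spec : Claim_equal_transcript_tail_lines_py := by
  intro transcript max_lines _
  unfold Spec_transcript_tail_lines_py transcript_tail_lines_py transcript_tail_lines_py_alt
  exact pvMain (PySem.Str.splitlines (transcript.getD ""))
    (max 8 (min max_lines 200)) (le_max_left _ _)
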